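-- pv_equiv track=rewrite | github.com/dldinternet-rs/rds-snapshot-tool | lambda/snapshots_tool_utils.py | search_tag_shared
-- ===== SOURCE A (Python) =====
-- def search_tag_shared(response):
-- # Takes a describe_db_snapshots response and searches for our shareAndCopy tag
--     try:
--         for tag in response['TagList']:
--             if tag['Key'] == 'shareAndCopy' and tag['Value'] == 'YES':
--                 for tag2 in response['TagList']:
--                     if tag2['Key'] == 'CreatedBy' and tag2['Value'] == 'Snapshot Tool for RDS':
--                         return True
--
--     except Exception:
--         return False
--
--     return False
-- ===== SOURCE B (Python) =====
-- def search_tag_shared(response):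
--     # Single pass with two flags instead of a nested double loop.
--     try:
--         found_share = False
--         found_created = False
--         for tag in response['TagList']:
--             if not found_share and tag['Key'] == 'shareAndCopy' and tag['Value'] == 'YES':
--                 found_share = True
--             if not found_created and tag['Key'] == 'CreatedBy' and tag['Value'] == 'Snapshot Tool for RDS':
--                 found_created = True
--             if found_share and found_created:
--                 return True
--         return False
--     except Exception:
--         return False
-- ===== Notes on version B (the rewrite author's own statement) =====
-- stated objective: simpler
-- what changed: Replaces the nested double loop (rescan of the whole TagList for CreatedBy each time a shareAndCopy tag is found) with a single pass maintaining two booleans, returning True as soon as both tags have been seen.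
import Mathlib
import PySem

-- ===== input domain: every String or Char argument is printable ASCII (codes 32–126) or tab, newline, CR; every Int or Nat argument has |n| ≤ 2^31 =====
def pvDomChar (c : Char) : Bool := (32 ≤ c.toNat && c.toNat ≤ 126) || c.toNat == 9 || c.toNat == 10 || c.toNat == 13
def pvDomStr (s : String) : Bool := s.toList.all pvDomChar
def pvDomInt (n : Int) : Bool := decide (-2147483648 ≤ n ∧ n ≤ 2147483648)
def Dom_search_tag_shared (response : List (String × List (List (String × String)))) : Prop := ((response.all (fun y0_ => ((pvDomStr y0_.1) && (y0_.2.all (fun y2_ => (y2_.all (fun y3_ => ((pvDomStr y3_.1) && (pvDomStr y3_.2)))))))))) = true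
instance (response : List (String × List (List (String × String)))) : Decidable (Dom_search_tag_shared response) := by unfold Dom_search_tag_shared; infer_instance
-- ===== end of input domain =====

-- B replaces A's nested double loop by a single pass with two booleans; equivalence is about the
-- return value (both versions turn every exception into False via try/except).

-- dict lookup tag['k']: first match in the association list; none = KeyError
def pvLook (d : List (String × String)) (k : String) : Option String :=
  (d.find? (fun p => p.1 == k)).map (fun p => p.2)

-- response['TagList']
def pvLook' (d : List (String × List (List (String × String)))) (k : String) :
    Option (List (List (String × String))) :=
  (d.find? (fun p => p.1 == k)).map (fun p => p.2)

-- ===== PORT A =====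
-- inner loop over the full TagList: some true = 'return True', some false = loop fell through,
-- none = an exception was raised (caught by A's except → False)
def pvAInner (tags : List (List (String × String))) : Option Bool :=
  match tags with
  | [] => some false
  | t :: rest =>
    match pvLook t "Key" with
    | none => none
    | some k =>
      if k = "CreatedBy" then
        match pvLook t "Value" with
        | none => none
        | some v => if v = "Snapshot Tool for RDS" then some true else pvAInner rest
      else pvAInner rest

-- outer loop; `all` is the full TagList rescanned by the inner loop; any exception → false
def pvAOuter (tags all : List (List (String × String))) : Bool :=
  match tags with
  | [] => false
  | t :: rest =>
    match pvLook t "Key" with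
    | none => false
    | some k =>
      if k = "shareAndCopy" then
        match pvLook t "Value" with
        | none => false
        | some v =>
          if v = "YES" then
            match pvAInner all with
            | none => false
            | some true => true
            | some false => pvAOuter rest all
          else pvAOuter rest all
      else pvAOuter rest all

def search_tag_shared (response : List (String × List (List (String × String)))) : Bool :=
  match pvLook' response "TagList" with
  | none => false                                   -- KeyError → except → False
  | some tags => pvAOuter tags tags

-- ===== PORT B =====
-- one loop step for the found_share flag: none = exception
def pvShareStep (t : List (String × String)) (fs : Bool) : Option Bool :=
  if fs then some true
  else
    match pvLook t "Key" with
    | none => none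
    | some k =>
      if k = "shareAndCopy" then
        match pvLook t "Value" with
        | none => none
        | some v => some (v = "YES")
      else some false

-- one loop step for the found_created flag: none = exception
def pvCreatedStep (t : List (String × String)) (fc : Bool) : Option Bool :=
  if fc then some true
  else
    match pvLook t "Key" with
    | none => none
    | some k =>
      if k = "CreatedBy" then
        match pvLook t "Value" with
        | none => none
        | some v => some (v = "Snapshot Tool for RDS")
      else some false

-- B's single pass with the two flags; any exception → except → false
def pvBLoop (tags : List (List (String × String))) (fs fc : Bool) : Bool :=
  match tags with
  | [] => false
  | t :: rest =>
    match pvShareStep t fs with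
    | none => false
    | some fs' =>
      match pvCreatedStep t fc with
      | none => false
      | some fc' => if fs' && fc' then true else pvBLoop rest fs' fc'

def search_tag_shared_alt (response : List (String × List (List (String × String)))) : Bool :=
  match pvLook' response "TagList" with
  | none => false
  | some tags => pvBLoop tags false false

-- ===== PRECONDITION & SPEC =====
def Spec_search_tag_shared (response : List (String × List (List (String × String)))) (out : Bool) : Prop := out = search_tag_shared_alt response
instance (response : List (String × List (List (String × String)))) (out : Bool) : Decidable (Spec_search_tag_shared response out) := by unfold Spec_search_tag_shared; infer_instance

-- ===== CLAIM (what is proved, stated in full; the proofs are below) =====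
def Claim_equal_search_tag_shared : Prop := ∀ (response : List (String × List (List (String × String)))), Dom_search_tag_shared response → Spec_search_tag_shared response (search_tag_shared response)

-- ===== LEMMAS AND PROOFS =====

-- the successful-scan-for-shareAndCopy/YES predicate both sides compute
def pvShareScan (tags : List (List (String × String))) : Bool :=
  match tags with
  | [] => false
  | t :: rest =>
    match pvLook t "Key" with
    | none => false
    | some k =>
      if k = "shareAndCopy" then
        match pvLook t "Value" with
        | none => false
        | some v => if v = "YES" then true else pvShareScan rest
      else pvShareScan rest

def pvCreatedScan (tags : List (List (String × String))) : Bool :=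
  match tags with
  | [] => false
  | t :: rest =>
    match pvLook t "Key" with
    | none => false
    | some k =>
      if k = "CreatedBy" then
        match pvLook t "Value" with
        | none => false
        | some v => if v = "Snapshot Tool for RDS" then true else pvCreatedScan rest
      else pvCreatedScan rest

theorem pvAInner_eq (tags : List (List (String × String))) :
    (pvAInner tags == some true) = pvCreatedScan tags := by
  induction tags with
  | nil => rfl
  | cons t rest ih =>
    cases hK : pvLook t "Key" with
    | none => simp [pvAInner, pvCreatedScan, hK]
    | some k =>
      by_cases hk : k = "CreatedBy"
      · cases hV : pvLook t "Value" with
        | none => simp [pvAInner, pvCreatedScan, hK, hk, hV]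
        | some v =>
          by_cases hv : v = "Snapshot Tool for RDS" <;>
            simp [pvAInner, pvCreatedScan, hK, hk, hV, hv, ih]
      · simp [pvAInner, pvCreatedScan, hK, hk, ih]

theorem pvAOuter_eq (tags all : List (List (String × String))) :
    pvAOuter tags all = (pvShareScan tags && pvCreatedScan all) := by
  induction tags with
  | nil => rfl
  | cons t rest ih =>
    cases hK : pvLook t "Key" with
    | none => simp [pvAOuter, pvShareScan, hK]
    | some k =>
      by_cases hk : k = "shareAndCopy"
      · cases hV : pvLook t "Value" with
        | none => simp [pvAOuter, pvShareScan, hK, hk, hV]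
        | some v =>
          by_cases hv : v = "YES"
          · rw [← pvAInner_eq all]
            cases hI : pvAInner all with
            | none => simp [pvAOuter, pvShareScan, hK, hk, hV, hv, hI, ih]
            | some b =>
              cases b with
              | true => simp [pvAOuter, pvShareScan, hK, hk, hV, hv, hI, pvAInner_eq]
              | false =>
                have hC : pvCreatedScan all = false := by rw [← pvAInner_eq all, hI]; rfl
                simp [pvAOuter, pvShareScan, hK, hk, hV, hv, hI, ih, hC]
          · simp [pvAOuter, pvShareScan, hK, hk, hV, hv, ih]
      · simp [pvAOuter, pvShareScan, hK, hk, ih]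

theorem pvBLoop_eq (tags : List (List (String × String))) (fs fc : Bool)
    (h : ¬ (fs = true ∧ fc = true)) :
    pvBLoop tags fs fc = ((fs || pvShareScan tags) && (fc || pvCreatedScan tags)) := by
  induction tags generalizing fs fc with
  | nil =>
    cases fs <;> cases fc <;> simp_all [pvBLoop, pvShareScan, pvCreatedScan]
  | cons t rest ih =>
    have hdiff : ("shareAndCopy" : String) ≠ "CreatedBy" := by decide
    cases fs with
    | true =>
      have hfc : fc = false := by cases fc <;> simp_all
      subst hfc
      cases hK : pvLook t "Key" with
      | none => simp [pvBLoop, pvShareStep, pvCreatedStep, pvCreatedScan, hK]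
      | some k =>
        by_cases hk2 : k = "CreatedBy"
        · cases hV : pvLook t "Value" with
          | none => simp [pvBLoop, pvShareStep, pvCreatedStep, pvCreatedScan, hK, hk2, hV]
          | some v =>
            by_cases hv : v = "Snapshot Tool for RDS"
            · simp [pvBLoop, pvShareStep, pvCreatedStep, pvCreatedScan, hK, hk2, hV, hv]
            · simp [pvBLoop, pvShareStep, pvCreatedStep, pvCreatedScan, hK, hk2, hV, hv,
                ih true false (by simp)]
        · simp [pvBLoop, pvShareStep, pvCreatedStep, pvCreatedScan, hK, hk2,
            ih true false (by simp)]
    | false =>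
      cases hK : pvLook t "Key" with
      | none => simp [pvBLoop, pvShareStep, pvShareScan, hK]
      | some k =>
        by_cases hk1 : k = "shareAndCopy"
        · have hk2 : ¬ k = "CreatedBy" := by rw [hk1]; exact hdiff
          cases hV : pvLook t "Value" with
          | none => simp [pvBLoop, pvShareStep, pvShareScan, hK, hk1, hV]
          | some v =>
            cases fc with
            | true =>
              by_cases hv : v = "YES"
              · simp [pvBLoop, pvShareStep, pvCreatedStep, pvShareScan, hK, hk1, hk2, hV, hv]
              · simp [pvBLoop, pvShareStep, pvCreatedStep, pvShareScan, hK, hk1, hk2, hV, hv,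
                  ih false true (by simp)]
            | false =>
              by_cases hv : v = "YES" <;>
                simp [pvBLoop, pvShareStep, pvCreatedStep, pvShareScan, pvCreatedScan,
                  hK, hk1, hk2, hV, hv, ih true false (by simp), ih false false (by simp)]
        · by_cases hk2 : k = "CreatedBy"
          · cases fc with
            | true =>
              simp [pvBLoop, pvShareStep, pvCreatedStep, pvShareScan, pvCreatedScan,
                hK, hk1, hk2, ih false true (by simp)]
            | false =>
              cases hV : pvLook t "Value" with
              | none =>
                simp [pvBLoop, pvShareStep, pvCreatedStep, pvShareScan, pvCreatedScan,
                  hK, hk1, hk2, hV]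
              | some v =>
                by_cases hv : v = "Snapshot Tool for RDS" <;>
                  simp [pvBLoop, pvShareStep, pvCreatedStep, pvShareScan, pvCreatedScan,
                    hK, hk1, hk2, hV, hv,
                    ih false true (by simp), ih false false (by simp)]
          · cases fc with
            | true =>
              simp [pvBLoop, pvShareStep, pvCreatedStep, pvShareScan, pvCreatedScan,
                hK, hk1, hk2, ih false true (by simp)]
            | false =>
              simp [pvBLoop, pvShareStep, pvCreatedStep, pvShareScan, pvCreatedScan,
                hK, hk1, hk2, ih false false (by simp)]

-- ===== VERDICT (by name: the statement is the Claim_ definition above) =====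
theorem search_tag_shared_spec : Claim_equal_search_tag_shared := by
  intro response _
  unfold Spec_search_tag_shared search_tag_shared search_tag_shared_alt
  cases pvLook' response "TagList" with
  | none => rfl
  | some tags =>
    simp only [pvAOuter_eq, pvBLoop_eq tags false false (by simp), Bool.false_or]
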